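-- pv_equiv track=rewrite | github.com/sunilgitb/DSAlgo-Python | 22_Math/23. Sorted Adjacent Differences.py | solve
-- ===== SOURCE A (Python) =====
-- def solve(arr):
--     """
--     Rearrange array such that absolute difference between adjacent elements is minimized.
--     Returns the rearranged array.
--     """
--     n = len(arr)
--     arr.sort()  # Sort the array first
--
--     res = [0] * n
--
--     if n % 2 == 0:
--         left = n // 2 - 1
--         right = n // 2
--         i = 0
--     else:
--         left = n // 2 - 1
--         right = n // 2 + 1
--         res[0] = arr[n // 2]
--         i = 1
--
--     while left >= 0 and right < n:
--         res[i] = arr[left]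
--         left -= 1
--         i += 1
--
--         res[i] = arr[right]
--         right += 1
--         i += 1
--
--     return res
-- ===== SOURCE B (Python) =====
-- def solve(arr):
--     """
--     Rearrange array such that absolute difference between adjacent elements is minimized.
--     Returns the rearranged array.
--     """
--     arr.sort()
--     out = []
--     lo, hi = 0, len(arr) - 1
--     take_hi = True
--     while lo <= hi:
--         if take_hi:
--             out.append(arr[hi])
--             hi -= 1
--         else:
--             out.append(arr[lo])
--             lo += 1
--         take_hi = not take_hi
--     out.reverse()
--     return out
-- ===== Notes on version B (the rewrite author's own statement) =====
-- stated objective: alternative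
-- what changed: Instead of writing outward from the median into a preallocated array with two center pointers and an odd/even case split, B consumes the sorted array from its two ends, alternately appending the largest and then smallest remaining element, and reverses the collected list; no middle index or parity branch is needed.
import Mathlib
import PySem

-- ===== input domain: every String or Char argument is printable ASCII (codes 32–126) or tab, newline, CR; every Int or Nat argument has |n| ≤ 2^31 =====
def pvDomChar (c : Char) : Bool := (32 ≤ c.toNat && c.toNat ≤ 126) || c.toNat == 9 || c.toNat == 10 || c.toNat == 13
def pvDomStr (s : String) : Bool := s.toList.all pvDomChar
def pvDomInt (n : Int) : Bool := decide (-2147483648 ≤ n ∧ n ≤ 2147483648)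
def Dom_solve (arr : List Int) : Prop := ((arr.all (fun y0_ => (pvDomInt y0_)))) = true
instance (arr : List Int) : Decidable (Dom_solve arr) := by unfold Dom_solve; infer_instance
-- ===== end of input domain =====

-- B replaces A's out-from-the-middle two-pointer write loop (with its odd/even case split)
-- by alternately consuming the largest and smallest remaining element of the sorted array
-- from its two ends and reversing the collected list (objective: alternative decomposition).
-- Both A and B sort the argument list in place in Python; the equivalence proved is about the return value.

-- ===== PORT A =====
-- the while loop of A: writes arr[left], arr[right] into res at i, i+1, moving pointers outward
def solveLoop (s : List Int) (n : Int) (res : List Int) (left right i : Int) : List Int :=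
  if _h : 0 ≤ left ∧ right < n then
    let res1 := res.set i.toNat (PySem.List.pyGetD s left 0)
    let res2 := res1.set (i + 1).toNat (PySem.List.pyGetD s right 0)
    solveLoop s n res2 (left - 1) (right + 1) (i + 2)
  else res
termination_by (n - right).toNat
decreasing_by omega

def solve (arr : List Int) : List Int :=
  let n : Int := PySem.List.len arr
  let s := PySem.List.sorted arr (fun x => x) false
  let res := List.replicate n.toNat 0
  if PySem.Int.mod n 2 = 0 then
    solveLoop s n res (PySem.Int.floordiv n 2 - 1) (PySem.Int.floordiv n 2) 0
  else
    let res := res.set 0 (PySem.List.pyGetD s (PySem.Int.floordiv n 2) 0)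
    solveLoop s n res (PySem.Int.floordiv n 2 - 1) (PySem.Int.floordiv n 2 + 1) 1

-- ===== PORT B =====
-- B's while loop: alternately append arr[hi] / arr[lo], shrinking the segment from both ends
def altTake (s : List Int) (lo hi : Int) (takeHi : Bool) (out : List Int) : List Int :=
  if _h : lo ≤ hi then
    if takeHi then
      altTake s lo (hi - 1) false (out ++ [PySem.List.pyGetD s hi 0])
    else
      altTake s (lo + 1) hi true (out ++ [PySem.List.pyGetD s lo 0])
  else out
termination_by (hi - lo + 1).toNat
decreasing_by all_goals omega

def solve_alt (arr : List Int) : List Int :=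
  let s := PySem.List.sorted arr (fun x => x) false
  (altTake s 0 (PySem.List.len s - 1) true []).reverse

-- ===== PRECONDITION & SPEC =====
def Spec_solve (arr : List Int) (out : List Int) : Prop := out = solve_alt arr
instance (arr : List Int) (out : List Int) : Decidable (Spec_solve arr out) := by unfold Spec_solve; infer_instance

-- ===== CLAIM (what is proved, stated in full; the proofs are below) =====
def Claim_equal_solve : Prop := ∀ (arr : List Int), Dom_solve arr → Spec_solve arr (solve arr)

-- ===== LEMMAS AND PROOFS =====

-- common middle form both ports are reduced to
def interleave : List Int → List Int → List Int
  | x :: xs, y :: ys => x :: y :: interleave xs ys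
  | _, _ => []

-- writing a, b at positions i, i+1 then taking i+2 extends the written prefix by [a, b]
lemma take_set_set (res : List Int) (i : Nat) (a b : Int) (h : i + 2 ≤ res.length) :
    (((res.set i a).set (i + 1) b).take (i + 2)) = res.take i ++ [a, b] := by
  apply List.ext_getElem
  · simp; omega
  · intro j h1 h2
    simp only [List.getElem_take, List.getElem_set]
    by_cases hji : j < i
    · rw [List.getElem_append_left (by simp; omega)]
      simp only [List.getElem_take]
      rw [if_neg (by omega), if_neg (by omega)]
    · rw [List.getElem_append_right (by simp; omega)]
      by_cases hj0 : j = i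
      · subst hj0
        rw [if_neg (by omega), if_pos rfl]
        simp [Nat.min_eq_left (show j ≤ res.length by omega)]
      · have : j = i + 1 := by simp at h1; omega
        subst this
        rw [if_pos rfl]
        simp [Nat.min_eq_left (show i ≤ res.length by omega)]

-- A's loop invariant: with the remaining lower and upper halves balanced,
-- the loop fills the rest of res with the interleaving
lemma solveLoop_eq (s : List Int) (res : List Int) (left right i : Int)
    (hbal : left + 1 = (s.length : Int) - right)
    (hi : i = (s.length : Int) - 2 * (left + 1))
    (hi0 : 0 ≤ i)
    (hlen : res.length = s.length)
    (hl : -1 ≤ left) :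
    solveLoop s (s.length) res left right i =
      res.take i.toNat ++ interleave ((s.take (left + 1).toNat).reverse) (s.drop right.toNat) := by
  generalize hK : (left + 1).toNat = K at *
  induction K generalizing res left right i with
  | zero =>
      have hleft : left = -1 := by omega
      have hright : right = (s.length : Int) := by omega
      have hii : i = (s.length : Int) := by omega
      subst hleft hright hii
      rw [solveLoop, dif_neg (by omega : ¬(0 ≤ (-1 : Int) ∧ (s.length : Int) < (s.length : Int)))]
      rw [List.take_zero, List.reverse_nil,
        show ((s.length : Int)).toNat = s.length from by omega, List.drop_length,
        List.take_of_length_le (by omega)]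
      simp [interleave]
  | succ K ih =>
      have hl0 : 0 ≤ left := by omega
      have hr : right < (s.length : Int) := by omega
      have hlK : left.toNat = K := by omega
      rw [solveLoop]
      rw [dif_pos (⟨hl0, hr⟩ : 0 ≤ left ∧ right < (s.length : Int))]
      have hKN : K < s.length := by omega
      have hrtN : right.toNat < s.length := by omega
      rw [PySem.List.pyGetD_eq_getElem s 0 hl0 (by omega),
        PySem.List.pyGetD_eq_getElem s 0 (show (0:Int) ≤ right by omega) (by omega)]
      rw [ih _ (left - 1) (right + 1) (i + 2) (by omega) (by omega) (by omega) (by simp [hlen]) (by omega) (by omega)]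
      rw [show (i + 2).toNat = i.toNat + 2 by omega, show (i + 1).toNat = i.toNat + 1 by omega,
        take_set_set res i.toNat _ _ (by omega)]
      have htake : s.take (K + 1) = s.take K ++ [s[K]] :=
        List.take_succ_eq_append_getElem hKN
      have hdrop : s.drop right.toNat = s[right.toNat] :: s.drop (right.toNat + 1) :=
        List.drop_eq_getElem_cons hrtN
      rw [htake, hdrop, List.reverse_append, List.reverse_singleton, List.singleton_append,
        interleave]
      rw [show (right + 1).toNat = right.toNat + 1 by omega]
      simp [hlK]

-- characterization of A: middle element (odd case) followed by the interleaving of the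
-- reversed lower half with the upper half of the sorted array
lemma solve_char (arr : List Int) (s : List Int)
    (hs : s = PySem.List.sorted arr (fun x => x) false) :
    solve arr =
      (if s.length % 2 = 0 then
        interleave ((s.take (s.length / 2)).reverse) (s.drop (s.length / 2))
       else
        s.getD (s.length / 2) 0 ::
          interleave ((s.take (s.length / 2)).reverse) (s.drop (s.length / 2 + 1))) := by
  unfold solve
  rw [← hs]
  have hlen : (PySem.List.len arr) = (s.length : Int) := by
    rw [PySem.List.len_eq, hs, PySem.List.length_sorted]
  simp only [hlen]
  set N := s.length with hN
  have hfd : PySem.Int.floordiv (N : Int) 2 = ((N / 2 : Nat) : Int) := by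
    exact_mod_cast PySem.Int.floordiv_natCast N 2
  have hmod : PySem.Int.mod (N : Int) 2 = ((N % 2 : Nat) : Int) := by
    exact_mod_cast PySem.Int.mod_natCast N 2
  simp only [hfd, hmod]
  by_cases hpar : N % 2 = 0
  · simp only [hpar, Nat.cast_zero, reduceIte]
    rw [solveLoop_eq s _ (((N / 2 : Nat) : Int) - 1) ((N / 2 : Nat) : Int) 0
      (by push_cast; omega) (by push_cast; omega) (by omega) (by simp; omega) (by omega)]
    rw [show ((0 : Int)).toNat = 0 from rfl, List.take_zero, List.nil_append,
      show ((((N / 2 : Nat) : Int) - 1) + 1).toNat = N / 2 by omega,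
      show (((N / 2 : Nat) : Int)).toNat = N / 2 by omega]
  · have hpar' : ¬ (((N % 2 : Nat) : Int) = 0) := by exact_mod_cast hpar
    simp only [if_neg hpar', if_neg hpar]
    have hNpos : 0 < N := by omega
    rw [solveLoop_eq s _ (((N / 2 : Nat) : Int) - 1) (((N / 2 : Nat) : Int) + 1) 1
      (by push_cast; omega) (by push_cast; omega) (by omega) (by simp; omega) (by omega)]
    rw [show ((((N / 2 : Nat) : Int) - 1) + 1).toNat = N / 2 by omega,
      show ((((N / 2 : Nat) : Int)) + 1).toNat = N / 2 + 1 by omega,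
      show ((1 : Int)).toNat = 1 from rfl]
    have h2 : ∀ x : Int, List.take 1 ((List.replicate ((N : Int)).toNat (0 : Int)).set 0 x) = [x] := by
      intro x
      rw [show ((N : Int)).toNat = N from by omega]
      cases hNN : N with
      | zero => omega
      | succ m => simp [List.replicate_succ]
    rw [h2]
    have h3 : PySem.List.pyGetD s ((N : Int) / 2) 0 = s[N / 2]?.getD 0 := by
      rw [show ((N : Int) / 2) = ((N / 2 : Nat) : Int) from by omega,
        PySem.List.pyGetD_natCast]
      rfl
    simp [List.getD, h3]

-- interleaving two equal-length lists each extended by one element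
lemma interleave_append (xs : List Int) : ∀ (ys : List Int) (a b : Int),
    xs.length = ys.length →
    interleave (xs ++ [a]) (ys ++ [b]) = interleave xs ys ++ [a, b] := by
  induction xs with
  | nil =>
      intro ys a b h
      cases ys with
      | nil => simp [interleave]
      | cons y ys => simp at h
  | cons x xs ih =>
      intro ys a b h
      cases ys with
      | nil => simp at h
      | cons y ys =>
        simp only [List.cons_append, interleave, List.length_cons] at *
        rw [ih ys a b (by omega)]

-- peeling one element off the front / the back of a (k+1)-element window of s
lemma take_succ_front (s : List Int) (a k : Nat) (h : a < s.length) :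
    (s.drop a).take (k + 1) = s.getD a 0 :: (s.drop (a + 1)).take k := by
  rw [List.drop_eq_getElem_cons h, List.take_succ_cons, List.getD_eq_getElem s 0 h]

lemma take_succ_back (s : List Int) (a k : Nat) (h : a + k < s.length) :
    (s.drop a).take (k + 1) = (s.drop a).take k ++ [s.getD (a + k) 0] := by
  rw [List.take_succ_eq_append_getElem (by simp; omega : k < (s.drop a).length),
    List.getElem_drop, List.getD_eq_getElem s 0 (by omega)]

-- B's loop on an even-length segment [lo, lo + 2k - 1]
lemma altTake_even (s : List Int) (k : Nat) : ∀ (lo : Int) (out : List Int),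
    0 ≤ lo → lo.toNat + 2 * k ≤ s.length →
    altTake s lo (lo + 2 * k - 1) true out =
      out ++ (interleave (((s.drop lo.toNat).take k).reverse)
                ((s.drop (lo.toNat + k)).take k)).reverse := by
  induction k with
  | zero =>
      intro lo out h0 hlen
      rw [altTake, dif_neg (by push_cast; omega : ¬ lo ≤ lo + 2 * ((0 : Nat) : Int) - 1)]
      simp [interleave]
  | succ k ih =>
      intro lo out h0 hlen
      obtain ⟨L, rfl⟩ : ∃ L : Nat, lo = (L : Int) := ⟨lo.toNat, by omega⟩
      simp only [Int.toNat_natCast] at hlen ⊢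
      rw [show (L : Int) + 2 * (((k + 1 : Nat)) : Int) - 1 = (L : Int) + 2 * (k : Int) + 1 by
        push_cast; ring]
      rw [altTake, dif_pos (by omega : (L : Int) ≤ (L : Int) + 2 * (k : Int) + 1), if_pos rfl]
      rw [show (L : Int) + 2 * (k : Int) + 1 - 1 = (L : Int) + 2 * (k : Int) by ring]
      rw [altTake, dif_pos (by omega : (L : Int) ≤ (L : Int) + 2 * (k : Int)),
        if_neg (by simp : ¬ (false = true))]
      rw [show (L : Int) + 2 * (k : Int) + 1 = ((L + 2 * k + 1 : Nat) : Int) by push_cast; ring]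
      rw [show (L : Int) + 2 * (k : Int) = ((L : Int) + 1) + 2 * (k : Int) - 1 by ring]
      rw [show (L : Int) + 1 = ((L + 1 : Nat) : Int) by push_cast; ring]
      simp only [PySem.List.pyGetD_natCast]
      rw [ih ((L + 1 : Nat) : Int) _ (by omega) (by simp; omega)]
      simp only [Int.toNat_natCast]
      rw [show L + (k + 1) = L + 1 + k by ring]
      rw [take_succ_front s L k (by omega)]
      rw [take_succ_back s (L + 1 + k) k (by omega)]
      rw [show L + 1 + k + k = L + 2 * k + 1 by ring]
      rw [List.reverse_cons, interleave_append _ _ _ _ (by simp; omega)]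
      simp [List.append_assoc]

-- B's loop on an odd-length segment [lo, lo + 2k]
lemma altTake_odd (s : List Int) (k : Nat) : ∀ (lo : Int) (out : List Int),
    0 ≤ lo → lo.toNat + 2 * k + 1 ≤ s.length →
    altTake s lo (lo + 2 * k) true out =
      out ++ (s.getD (lo.toNat + k) 0 ::
        interleave (((s.drop lo.toNat).take k).reverse)
          ((s.drop (lo.toNat + k + 1)).take k)).reverse := by
  induction k with
  | zero =>
      intro lo out h0 hlen
      rw [show lo + 2 * (((0 : Nat)) : Int) = lo by push_cast; ring]
      rw [altTake, dif_pos (le_refl lo), if_pos rfl]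
      rw [altTake, dif_neg (by omega : ¬ lo ≤ lo - 1)]
      rw [PySem.List.pyGetD_eq_getElem s 0 h0 (by omega)]
      rw [List.getD_eq_getElem s 0 (by omega)]
      simp [interleave]
  | succ k ih =>
      intro lo out h0 hlen
      obtain ⟨L, rfl⟩ : ∃ L : Nat, lo = (L : Int) := ⟨lo.toNat, by omega⟩
      simp only [Int.toNat_natCast] at hlen ⊢
      rw [show (L : Int) + 2 * (((k + 1 : Nat)) : Int) = (L : Int) + 2 * (k : Int) + 2 by
        push_cast; ring]
      rw [altTake, dif_pos (by omega : (L : Int) ≤ (L : Int) + 2 * (k : Int) + 2), if_pos rfl]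
      rw [show (L : Int) + 2 * (k : Int) + 2 - 1 = (L : Int) + 2 * (k : Int) + 1 by ring]
      rw [altTake, dif_pos (by omega : (L : Int) ≤ (L : Int) + 2 * (k : Int) + 1),
        if_neg (by simp : ¬ (false = true))]
      rw [show (L : Int) + 2 * (k : Int) + 2 = ((L + 2 * k + 2 : Nat) : Int) by push_cast; ring]
      rw [show (L : Int) + 2 * (k : Int) + 1 = ((L : Int) + 1) + 2 * (k : Int) by ring]
      rw [show (L : Int) + 1 = ((L + 1 : Nat) : Int) by push_cast; ring]
      simp only [PySem.List.pyGetD_natCast]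
      rw [ih ((L + 1 : Nat) : Int) _ (by omega) (by simp; omega)]
      simp only [Int.toNat_natCast]
      rw [show L + (k + 1) = L + 1 + k by ring]
      rw [take_succ_front s L k (by omega)]
      rw [take_succ_back s (L + 1 + k + 1) k (by omega)]
      rw [show L + 1 + k + 1 + k = L + 2 * k + 2 by ring]
      rw [List.reverse_cons (a := s.getD L 0), interleave_append _ _ _ _ (by simp; omega)]
      simp [List.append_assoc]

-- ===== VERDICT (by name: the statement is the Claim_ definition above) =====
theorem solve_spec : Claim_equal_solve := by
  intro arr _
  unfold Spec_solve solve_alt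
  set s := PySem.List.sorted arr (fun x => x) false with hs
  rw [solve_char arr s hs]
  set N := s.length with hN
  have hlenN : PySem.List.len s = (N : Int) := by rw [PySem.List.len_eq]
  simp only [hlenN]
  by_cases hpar : N % 2 = 0
  · rw [if_pos hpar]
    set m := N / 2 with hm
    have hN2 : N = 2 * m := by omega
    rw [show (N : Int) - 1 = (0 : Int) + 2 * (m : Int) - 1 by omega]
    rw [altTake_even s m 0 [] (by omega) (by omega)]
    rw [show ((0 : Int)).toNat = 0 from rfl]
    simp only [List.drop_zero, Nat.zero_add, List.nil_append, List.reverse_reverse]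
    rw [List.take_of_length_le (show (s.drop m).length ≤ m by simp; omega)]
  · rw [if_neg hpar]
    set m := N / 2 with hm
    have hN2 : N = 2 * m + 1 := by omega
    rw [show (N : Int) - 1 = (0 : Int) + 2 * (m : Int) by omega]
    rw [altTake_odd s m 0 [] (by omega) (by omega)]
    rw [show ((0 : Int)).toNat = 0 from rfl]
    simp only [List.drop_zero, Nat.zero_add, List.nil_append, List.reverse_reverse]
    rw [List.take_of_length_le (show (s.drop (m + 1)).length ≤ m by simp; omega)]
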